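-- pv_equiv track=rewrite | github.com/FredeBas/Ai-Grader | backend/aggregator.py | _union_dedup
-- ===== SOURCE A (Python) =====
-- def _union_dedup(lists: list[list[str]], cap: int) -> list[str]:
--     """Tag union af lister med stabil orden og dedup på case-insensitive match."""
--     seen: set[str] = set()
--     out: list[str] = []
--     # Round-robin: tag #1 fra hver liste, så #2 osv. - giver god diversitet
--     max_len = max((len(lst) for lst in lists), default=0)
--     for i in range(max_len):
--         for lst in lists:
--             if i < len(lst):
--                 item = lst[i]
--                 key = item.lower().strip()
--                 if key not in seen:
--                     seen.add(key)
--                     out.append(item)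
--                     if len(out) >= cap:
--                         return out
--     return out
-- ===== SOURCE B (Python) =====
-- def _union_dedup(lists: list[list[str]], cap: int) -> list[str]:
--     """Rank every item by its round-robin position, sort once, then dedup-scan up to cap."""
--     n = len(lists)
--     ranked = [(i * n + j, item)
--               for j, lst in enumerate(lists)
--               for i, item in enumerate(lst)]
--     ranked.sort(key=lambda t: t[0])
--     seen: set[str] = set()
--     out: list[str] = []
--     for _, item in ranked:
--         key = item.lower().strip()
--         if key not in seen:
--             seen.add(key)
--             out.append(item)
--             if len(out) >= cap:
--                 break
--     return out
-- ===== Notes on version B (the rewrite author's own statement) =====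
-- stated objective: alternative
-- what changed: Replaces A's max_len computation and nested column-major index loops by decorate-sort-scan: every item gets a single round-robin rank i*len(lists)+j in one row-major comprehension, a stable sort by that rank produces the interleaved order, and one flat dedup pass with the cap runs over it.
import Mathlib
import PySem

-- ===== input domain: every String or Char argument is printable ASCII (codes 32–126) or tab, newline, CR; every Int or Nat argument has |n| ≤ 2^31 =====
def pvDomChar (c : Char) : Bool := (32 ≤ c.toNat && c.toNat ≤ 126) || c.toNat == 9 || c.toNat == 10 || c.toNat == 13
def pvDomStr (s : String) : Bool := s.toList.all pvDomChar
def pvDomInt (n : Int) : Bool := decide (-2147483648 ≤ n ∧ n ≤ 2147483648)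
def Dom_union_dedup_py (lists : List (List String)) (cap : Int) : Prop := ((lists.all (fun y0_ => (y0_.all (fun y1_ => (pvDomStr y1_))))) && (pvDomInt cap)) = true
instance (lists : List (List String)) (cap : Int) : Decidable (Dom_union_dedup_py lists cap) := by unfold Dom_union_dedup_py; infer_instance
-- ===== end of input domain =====

-- B replaces A's max_len computation and nested column-major index loops by
-- decorate-sort-scan: each item gets its round-robin rank i*len(lists)+j in one
-- row-major pass, a stable sort by rank yields the interleaved order, and one flat
-- dedup pass with the cap runs over it; objective: alternative.

-- key = item.lower().strip()  (shared helper)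
def udKey (s : String) : String := PySem.Str.strip (PySem.Str.lower s)

-- ===== PORT A =====
-- inner loop: 'for lst in lists: if i < len(lst): …'; i comes from range(max_len) so i ≥ 0
-- and 'lst[i]' is exactly 'lst[i]?' (some iff i < len); .inr models the early 'return out'.
def udInner (i : Nat) (ls : List (List String)) (seen : PySem.Set String)
    (out : List String) (cap : Int) : (PySem.Set String × List String) ⊕ List String :=
  match ls with
  | [] => .inl (seen, out)
  | l :: rest =>
    match l[i]? with
    | none => udInner i rest seen out cap
    | some item =>
      if PySem.Set.contains seen (udKey item) then udInner i rest seen out cap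
      else
        let out' := out ++ [item]
        if cap ≤ (out'.length : Int) then .inr out'
        else udInner i rest (PySem.Set.add seen (udKey item)) out' cap

-- outer loop: 'for i in range(max_len)'
def udOuter (is_ : List Nat) (ls : List (List String)) (seen : PySem.Set String)
    (out : List String) (cap : Int) : List String :=
  match is_ with
  | [] => out
  | i :: rest =>
    match udInner i ls seen out cap with
    | .inl (s, o) => udOuter rest ls s o cap
    | .inr r => r

def union_dedup_py (lists : List (List String)) (cap : Int) : List String :=
  let maxLen := (lists.map List.length).foldr Nat.max 0   -- max(..., default=0)
  udOuter (List.range maxLen) lists PySem.Set.empty [] cap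

-- ===== PORT B =====
-- the row-major decorating comprehension:
-- [(i*n+j, item) for j, lst in enumerate(lists) for i, item in enumerate(lst)]
def udRanked (lists : List (List String)) : List (Int × String) :=
  let n : Int := lists.length
  (PySem.List.enumerate lists 0).flatMap (fun jl =>
    (PySem.List.enumerate jl.2 0).map (fun ii => (ii.1 * n + jl.1, ii.2)))

-- the flat dedup pass over the sorted stream ('for _, item in ranked: …'; break then return out)
def udScanB (stream : List (Int × String)) (seen : PySem.Set String)
    (out : List String) (cap : Int) : List String :=
  match stream with
  | [] => out
  | (_, item) :: rest =>
    if PySem.Set.contains seen (udKey item) then udScanB rest seen out cap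
    else
      let out' := out ++ [item]
      if cap ≤ (out'.length : Int) then out'
      else udScanB rest (PySem.Set.add seen (udKey item)) out' cap

-- ranked.sort(key=lambda t: t[0])  (stable), then the dedup pass
def union_dedup_py_alt (lists : List (List String)) (cap : Int) : List String :=
  udScanB (PySem.List.sorted (udRanked lists) (fun t => t.1) false) PySem.Set.empty [] cap

-- ===== PRECONDITION & SPEC =====
def Spec_union_dedup_py (lists : List (List String)) (cap : Int) (out : List String) : Prop := out = union_dedup_py_alt lists cap
instance (lists : List (List String)) (cap : Int) (out : List String) : Decidable (Spec_union_dedup_py lists cap out) := by unfold Spec_union_dedup_py; infer_instance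

-- ===== CLAIM (what is proved, stated in full; the proofs are below) =====
def Claim_equal_union_dedup_py : Prop := ∀ (lists : List (List String)) (cap : Int), Dom_union_dedup_py lists cap → Spec_union_dedup_py lists cap (union_dedup_py lists cap)

-- ===== LEMMAS AND PROOFS =====

-- column i of the round-robin order, carrying its ranks; j is the rank offset of the first list
def udCol (i : Nat) (n : Int) (j : Int) : List (List String) → List (Int × String)
  | [] => []
  | l :: rest =>
    (match l[i]? with
     | some it => [((i : Int) * n + j, it)]
     | none => []) ++ udCol i n (j + 1) rest

def udMaxLen (lists : List (List String)) : Nat := (lists.map List.length).foldr Nat.max 0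

-- the target order: A's columns 0 .. max_len-1, each with its ranks
def udT (lists : List (List String)) : List (Int × String) :=
  (List.range (udMaxLen lists)).flatMap (fun i => udCol i (lists.length : Int) 0 lists)

theorem udLen_le_maxLen (lists : List (List String)) (l : List String) (h : l ∈ lists) :
    l.length ≤ udMaxLen lists := by
  induction lists with
  | nil => simp at h
  | cons a t ih =>
    rw [List.mem_cons] at h
    simp only [udMaxLen, List.map_cons, List.foldr_cons]
    rcases h with h | h
    · subst h; exact Nat.le_max_left _ _
    · exact le_trans (ih h) (Nat.le_max_right _ _)

theorem udCol_mem (i : Nat) (n : Int) (ls : List (List String)) (p : Int × String) :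
    ∀ j : Int, p ∈ udCol i n j ls ↔ ∃ k : Nat,
      (ls[k]?.bind fun l => l[i]?) = some p.2 ∧ p.1 = (i : Int) * n + j + k := by
  induction ls with
  | nil => simp [udCol]
  | cons l t ih =>
    intro j
    simp only [udCol, List.mem_append, ih (j+1)]
    constructor
    · rintro (h | ⟨k, hk, hr⟩)
      · cases hli : l[i]? with
        | none => simp [hli] at h
        | some it =>
          refine ⟨0, ?_, ?_⟩ <;> simp_all
      · exact ⟨k+1, by simpa using hk, by push_cast; omega⟩
    · rintro ⟨k, hk, hr⟩
      cases k with
      | zero =>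
        left
        simp only [List.getElem?_cons_zero, Option.bind_some] at hk
        cases hli : l[i]? with
        | none => simp [hli] at hk
        | some it => simp_all [Prod.ext_iff]
      | succ k =>
        right
        exact ⟨k, by simpa using hk, by push_cast at hr ⊢; omega⟩

theorem udGetBind_lt {ls : List (List String)} {k i : Nat} {x : String}
    (h : (ls[k]?.bind fun l => l[i]?) = some x) : k < ls.length := by
  by_contra hc
  rw [List.getElem?_eq_none (by omega)] at h
  simp at h

theorem udCol_pairwise (i : Nat) (n : Int) (ls : List (List String)) :
    ∀ j : Int, (udCol i n j ls).Pairwise (fun a b => a.1 < b.1) := by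
  induction ls with
  | nil => intro j; simp [udCol]
  | cons l t ih =>
    intro j
    simp only [udCol]
    cases hli : l[i]? with
    | none => simpa using ih (j+1)
    | some it =>
      simp only [List.singleton_append]
      refine List.Pairwise.cons ?_ (ih (j+1))
      intro y hy
      obtain ⟨k, _, hr⟩ := ((udCol_mem i n t y) (j+1)).mp hy
      have hk : (0:Int) ≤ (k:Int) := Int.natCast_nonneg k
      simp only [hr]
      linarith

theorem udT_pairwise (lists : List (List String)) :
    (udT lists).Pairwise (fun a b => a.1 < b.1) := by
  unfold udT
  rw [List.flatMap_def]
  apply List.pairwise_flatten.mpr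
  constructor
  · intro l hl
    obtain ⟨i, _, rfl⟩ := List.mem_map.mp hl
    exact udCol_pairwise i _ lists 0
  · rw [List.pairwise_map]
    refine List.Pairwise.imp ?_ List.pairwise_lt_range
    intro i1 i2 h12 x hx y hy
    obtain ⟨k1, hk1, hr1⟩ := ((udCol_mem i1 _ lists x) 0).mp hx
    obtain ⟨k2, hk2, hr2⟩ := ((udCol_mem i2 _ lists y) 0).mp hy
    have hl1 : k1 < lists.length := udGetBind_lt hk1
    have hc1 : ((i1:Int)+1) * (lists.length:Int) ≤ (i2:Int) * (lists.length:Int) := by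
      have : (i1+1) * lists.length ≤ i2 * lists.length :=
        Nat.mul_le_mul_right _ (Nat.succ_le_of_lt h12)
      exact_mod_cast this
    have hc2 : ((k1:Int)) < ((lists.length:Int)) := by exact_mod_cast hl1
    have hc3 : (0:Int) ≤ (k2:Int) := Int.natCast_nonneg k2
    rw [hr1, hr2]
    nlinarith

theorem udRanked_mem (lists : List (List String)) (p : Int × String) :
    p ∈ udRanked lists ↔ ∃ j i : Nat,
      (lists[j]?.bind fun l => l[i]?) = some p.2 ∧
      p.1 = (i : Int) * (lists.length : Int) + (j : Int) := by
  unfold udRanked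
  simp only [List.mem_flatMap, List.mem_map, PySem.List.mem_enumerate_iff]
  constructor
  · rintro ⟨jl, ⟨j, hj, rfl⟩, ii, ⟨i, hi, rfl⟩, rfl⟩
    refine ⟨j, i, ?_, by push_cast; ring⟩
    simp [List.getElem?_eq_getElem hj, List.getElem?_eq_getElem hi]
  · rintro ⟨j, i, hb, hr⟩
    have hj : j < lists.length := udGetBind_lt hb
    rw [List.getElem?_eq_getElem hj, Option.bind_some] at hb
    have hi : i < lists[j].length := by
      by_contra hc
      rw [List.getElem?_eq_none (by omega)] at hb; simp at hb
    rw [List.getElem?_eq_getElem hi] at hb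
    obtain ⟨p1, p2⟩ := p
    simp only [Option.some.injEq] at hb
    simp only at hr
    refine ⟨((0:Int) + (j:Int), lists[j]), ⟨j, hj, rfl⟩,
            ((0:Int) + (i:Int), lists[j][i]), ⟨i, hi, rfl⟩, ?_⟩
    simp [hb, hr]

theorem udRankInj (n i1 j1 i2 j2 : Nat) (h1 : j1 < n) (h2 : j2 < n)
    (h : i1 * n + j1 = i2 * n + j2) : i1 = i2 ∧ j1 = j2 := by
  have hmain : i1 = i2 := by
    rcases Nat.lt_trichotomy i1 i2 with hlt | heq | hgt
    · have := Nat.mul_le_mul_right n (Nat.succ_le_of_lt hlt)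
      simp [Nat.succ_mul] at this; omega
    · exact heq
    · have := Nat.mul_le_mul_right n (Nat.succ_le_of_lt hgt)
      simp [Nat.succ_mul] at this; omega
  subst hmain
  exact ⟨rfl, by omega⟩

theorem udRanked_nodup (lists : List (List String)) : (udRanked lists).Nodup := by
  have hp : (udRanked lists).Pairwise (fun a b => a.1 ≠ b.1) := by
    unfold udRanked
    rw [List.flatMap_def]
    apply List.pairwise_flatten.mpr
    constructor
    · intro l hl
      obtain ⟨jl, hjl, rfl⟩ := List.mem_map.mp hl
      obtain ⟨j, hj, rfl⟩ := (PySem.List.mem_enumerate_iff _ _ _).mp hjl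
      have hn : ((lists.length : Int)) ≠ 0 := by
        have : 0 < lists.length := by omega
        exact_mod_cast Nat.pos_iff_ne_zero.mp this
      rw [List.pairwise_map]
      refine List.Pairwise.imp ?_ (PySem.List.pairwise_lt_enumerate lists[j] 0)
      intro a b hab heq
      simp only at heq
      have h2 : a.1 * (lists.length : Int) = b.1 * (lists.length : Int) :=
        add_right_cancel heq
      exact absurd (mul_right_cancel₀ hn h2) (ne_of_lt hab)
    · rw [List.pairwise_map]
      refine List.Pairwise.imp_of_mem ?_ (PySem.List.pairwise_lt_enumerate lists 0)
      intro jl1 jl2 h1 h2 hlt x hx y hy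
      obtain ⟨j1, hj1, rfl⟩ := (PySem.List.mem_enumerate_iff _ _ _).mp h1
      obtain ⟨j2, hj2, rfl⟩ := (PySem.List.mem_enumerate_iff _ _ _).mp h2
      obtain ⟨ii1, hii1, rfl⟩ := List.mem_map.mp hx
      obtain ⟨ii2, hii2, rfl⟩ := List.mem_map.mp hy
      obtain ⟨i1, hi1, rfl⟩ := (PySem.List.mem_enumerate_iff _ _ _).mp hii1
      obtain ⟨i2, hi2, rfl⟩ := (PySem.List.mem_enumerate_iff _ _ _).mp hii2
      intro heq
      simp only [zero_add] at heq hlt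
      have hnat : i1 * lists.length + j1 = i2 * lists.length + j2 := by exact_mod_cast heq
      have := (udRankInj lists.length i1 j1 i2 j2 hj1 hj2 hnat).2
      omega
  exact hp.imp (fun h heq => h (by rw [heq]))

theorem udT_perm (lists : List (List String)) : (udT lists).Perm (udRanked lists) := by
  have hnd : (udT lists).Nodup :=
    (udT_pairwise lists).imp (fun h heq => by subst heq; exact absurd h (lt_irrefl _))
  rw [List.perm_ext_iff_of_nodup hnd (udRanked_nodup lists)]
  intro p
  rw [udRanked_mem]
  unfold udT
  simp only [List.mem_flatMap, List.mem_range]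
  constructor
  · rintro ⟨i, hi, hp⟩
    obtain ⟨k, hk, hr⟩ := ((udCol_mem i _ lists p) 0).mp hp
    exact ⟨k, i, hk, by rw [hr]; ring⟩
  · rintro ⟨j, i, hb, hr⟩
    have hj : j < lists.length := udGetBind_lt hb
    have hi : i < lists[j].length := by
      rw [List.getElem?_eq_getElem hj, Option.bind_some] at hb
      by_contra hc
      rw [List.getElem?_eq_none (by omega)] at hb; simp at hb
    have him : i < udMaxLen lists :=
      lt_of_lt_of_le hi (udLen_le_maxLen lists _ (List.getElem_mem hj))
    exact ⟨i, him, ((udCol_mem i _ lists p) 0).mpr ⟨j, hb, by rw [hr]; ring⟩⟩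

-- names the sorted order: the strictly rank-increasing column-major list IS sorted(ranked)
theorem udSorted_eq_T (lists : List (List String)) :
    PySem.List.sorted (udRanked lists) (fun t => t.1) false = udT lists :=
  PySem.List.sorted_eq_of_perm_of_pairwise_lt _ _ _ (udT_perm lists) (udT_pairwise lists)

-- scanning one ranked column (then the rest) = A's inner loop at index i
theorem udInner_scan (i : Nat) (n : Int) (ls : List (List String)) (seen : PySem.Set String)
    (out : List String) (cap : Int) (rest : List (Int × String)) :
    ∀ j : Int, udScanB (udCol i n j ls ++ rest) seen out cap
      = (match udInner i ls seen out cap with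
         | .inl (s, o) => udScanB rest s o cap
         | .inr r => r) := by
  induction ls generalizing seen out with
  | nil => intro j; simp [udCol, udInner]
  | cons l t ih =>
    intro j
    simp only [udCol, udInner, List.append_assoc]
    cases h : l[i]? with
    | none => simpa using ih seen out (j+1)
    | some item =>
      simp only [List.cons_append, udScanB]
      by_cases hc : PySem.Set.contains seen (udKey item) = true
      · simp only [hc, if_true]; exact ih seen out (j+1)
      · simp only [hc, Bool.false_eq_true, if_false]
        by_cases hcap : cap ≤ (((out ++ [item]).length : Nat) : Int)
        · rw [if_pos hcap, if_pos hcap]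
        · rw [if_neg hcap, if_neg hcap]
          exact ih _ _ (j+1)

-- the whole flat pass over the columns = A's outer loop
theorem udOuter_scan (is_ : List Nat) (ls : List (List String)) (seen : PySem.Set String)
    (out : List String) (cap : Int) :
    udOuter is_ ls seen out cap
      = udScanB ((is_.map (fun i => udCol i (ls.length : Int) 0 ls)).flatten) seen out cap := by
  induction is_ generalizing seen out with
  | nil => simp [udOuter, udScanB]
  | cons i rest ih =>
    simp only [List.map_cons, List.flatten_cons, udOuter]
    rw [udInner_scan]
    cases h : udInner i ls seen out cap with
    | inl p => cases p with | mk s o => simp [ih]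
    | inr r => simp

-- ===== VERDICT (by name: the statement is the Claim_ definition above) =====
theorem union_dedup_py_spec : Claim_equal_union_dedup_py := by
  intro lists cap _
  unfold Spec_union_dedup_py union_dedup_py union_dedup_py_alt
  rw [udSorted_eq_T, udOuter_scan]
  unfold udT udMaxLen
  rw [List.flatMap_def]
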